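-- pv_equiv track=rewrite | github.com/kstecrypto-hub/n8n-to-python | src/bee_ingestion/kg.py | _compute_ancestors
-- ===== SOURCE A (Python) =====
-- def _compute_ancestors(node: str, subclass_of: dict[str, set[str]], trail: set[str] | None = None) -> set[str]:
--     seen = set(trail or set())
--     parents = subclass_of.get(node, set())
--     results: set[str] = set()
--     for parent in parents:
--         if parent in seen:
--             continue
--         results.add(parent)
--         results.update(_compute_ancestors(parent, subclass_of, seen | {parent}))
--     return results
-- ===== SOURCE B (Python) =====
-- def _compute_ancestors(node: str, subclass_of: dict[str, set[str]], trail: set[str] | None = None) -> set[str]: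
--     # Iterative explicit-stack DFS: one shared blocked set (trail + already
--     # found) and a found list; each node is expanded at most once, instead of
--     # A's recursion with a per-path trail set copied at every call.
--     blocked = set(trail or ())
--     found: list[str] = []
--     stack = [list(subclass_of.get(node, ()))]
--     while stack:
--         top = stack[-1]
--         if not top:
--             stack.pop()
--             continue
--         p = top.pop(0)
--         if p in blocked:
--             continue
--         blocked.add(p)
--         found.append(p)
--         stack.append(list(subclass_of.get(p, ())))
--     return set(found)
-- ===== Notes on version B (the rewrite author's own statement) =====
-- stated objective: alternative
-- what changed: A computes ancestors by recursion with a per-path 'trail' set copied and extended at every call (re-exploring nodes reached along different paths); B runs one iterative explicit-stack DFS with a single shared blocked/visited set and a found list, expanding each node at most once.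
import Mathlib
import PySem

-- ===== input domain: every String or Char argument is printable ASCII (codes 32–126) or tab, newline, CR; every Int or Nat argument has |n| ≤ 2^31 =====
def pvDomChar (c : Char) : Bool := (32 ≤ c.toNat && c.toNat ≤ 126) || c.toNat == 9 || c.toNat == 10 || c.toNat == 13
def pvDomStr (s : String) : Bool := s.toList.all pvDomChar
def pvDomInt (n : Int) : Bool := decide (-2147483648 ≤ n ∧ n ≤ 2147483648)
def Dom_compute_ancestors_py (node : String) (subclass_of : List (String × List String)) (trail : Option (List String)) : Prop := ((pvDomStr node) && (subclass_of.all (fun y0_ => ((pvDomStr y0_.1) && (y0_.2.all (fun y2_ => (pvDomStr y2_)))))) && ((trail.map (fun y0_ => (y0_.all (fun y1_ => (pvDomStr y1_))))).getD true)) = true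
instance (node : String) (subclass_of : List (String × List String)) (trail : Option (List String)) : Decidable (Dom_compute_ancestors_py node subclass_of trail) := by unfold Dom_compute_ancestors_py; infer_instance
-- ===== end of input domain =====

-- B replaces A's recursion with per-path trail sets by an iterative explicit-stack DFS with one
-- shared blocked/visited set and a found list, so each node is expanded at most once
-- (objective: alternative).

-- shared helper: subclass_of.get(x, set()) — the dict lookup both Pythons perform
def pvChildren (g : List (String × List String)) (p : String) : List String :=
  (PySem.Dict.mk g).getD p []

-- all strings occurring in the mapping (keys and parents); only used for A's termination measure
def pvUniv (g : List (String × List String)) : List String :=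
  g.map Prod.fst ++ (g.map Prod.snd).flatten

-- the next four lemmas are cited only by the decreasing_by blocks of the recursions below
lemma pv_children_nil {g : List (String × List String)} {p : String}
    (hp : p ∉ pvUniv g) : pvChildren g p = [] := by
  induction g with
  | nil => rfl
  | cons kv rest ih =>
    simp only [pvChildren, PySem.Dict.getD_eq_get?_getD] at ih ⊢
    rw [show PySem.Dict.mk (kv :: rest) = { items := (kv.1, kv.2) :: rest } by rfl]
    rw [PySem.Dict.get?_mk_cons]
    have h1 : kv.1 ≠ p := by
      intro h; apply hp; simp [pvUniv, ← h]
    simp only [beq_iff_eq, h1, if_false]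
    apply ih
    intro h; apply hp
    simp only [pvUniv, List.mem_append, List.mem_map, List.mem_flatten] at h ⊢
    rcases h with ⟨x, hx, rfl⟩ | ⟨l, ⟨x, hx, rfl⟩, hcl⟩
    · exact Or.inl ⟨x, by simp [hx], rfl⟩
    · exact Or.inr ⟨x.2, ⟨x, by simp [hx], rfl⟩, hcl⟩

-- B's variant: a string that is not a KEY has no children (B's measure only counts keys)
lemma pv_keys_nil {g : List (String × List String)} {p : String}
    (hp : p ∉ g.map Prod.fst) : (PySem.Dict.mk g).getD p [] = [] := by
  induction g with
  | nil => rfl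
  | cons kv rest ih =>
    simp only [PySem.Dict.getD_eq_get?_getD] at ih ⊢
    rw [show PySem.Dict.mk (kv :: rest) = { items := (kv.1, kv.2) :: rest } by rfl]
    rw [PySem.Dict.get?_mk_cons]
    have h1 : kv.1 ≠ p := by intro h; apply hp; simp [← h]
    simp only [beq_iff_eq, h1, if_false]
    exact ih (fun h => hp (by simp only [List.map_cons, List.mem_cons]; exact Or.inr h))

lemma pv_filter_lt {s : PySem.Set String} {p : String} {U : List String}
    (hpU : p ∈ U) (hps : p ∉ s) :
    (U.filter (fun x => decide (x ∉ PySem.Set.add s p))).length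
      < (U.filter (fun x => decide (x ∉ s))).length := by
  induction U with
  | nil => simp at hpU
  | cons a U ih =>
    have hmono : (List.filter (fun x => decide (x ∉ PySem.Set.add s p)) U).length
        ≤ (List.filter (fun x => decide (x ∉ s)) U).length := by
      apply List.Sublist.length_le
      apply List.monotone_filter_right
      intro x hx
      simp only [decide_eq_true_eq, PySem.Set.mem_add] at hx ⊢
      tauto
    by_cases hap : a = p
    · subst hap
      rw [List.filter_cons, List.filter_cons]
      have h1 : (decide (a ∉ PySem.Set.add s a)) = false := by
        simp [PySem.Set.mem_add]
      have h2 : (decide (a ∉ s)) = true := by simp [hps]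
      rw [h1, h2]
      simp only [Bool.false_eq_true, if_false, if_true, List.length_cons]
      omega
    · have hpU' : p ∈ U := by
        rcases List.mem_cons.mp hpU with h | h
        · exact absurd h.symm hap
        · exact h
      simp only [List.filter_cons]
      by_cases ha : a ∈ s
      · have h1 : (decide (a ∉ PySem.Set.add s p)) = false := by simp [PySem.Set.mem_add, ha]
        have h2 : (decide (a ∉ s)) = false := by simp [ha]
        simpa [h1, h2] using ih hpU'
      · have h1 : (decide (a ∉ PySem.Set.add s p)) = true := by
          simp [PySem.Set.mem_add, ha, hap]
        have h2 : (decide (a ∉ s)) = true := by simp [ha]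
        simp only [h1, h2, if_true, List.length_cons]
        exact Nat.succ_lt_succ (ih hpU')

lemma pv_filter_add_eq {s : PySem.Set String} {p : String} {U : List String}
    (hpU : p ∉ U) :
    (U.filter (fun x => decide (x ∉ PySem.Set.add s p))).length
      = (U.filter (fun x => decide (x ∉ s))).length := by
  congr 1
  apply List.filter_congr
  intro x hx
  have : x ≠ p := fun h => hpU (h ▸ hx)
  simp [PySem.Set.mem_add, this]

-- ===== PORT A =====
-- the recursion of _compute_ancestors: loop over `parents` with the local set `results` (= r);
-- each recursive call gets seen | {parent}
def pvGoA (g : List (String × List String)) (seen : PySem.Set String)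
    (r : PySem.Set String) : List String → PySem.Set String
  | [] => r
  | p :: rest =>
    if p ∈ seen then pvGoA g seen r rest
    else pvGoA g seen
      (PySem.Set.update (PySem.Set.add r p)
        (pvGoA g (PySem.Set.add seen p) PySem.Set.empty (pvChildren g p))) rest
termination_by ps => (((pvUniv g).filter (fun x => decide (x ∉ seen))).length, ps.length)
decreasing_by
  · exact Prod.Lex.right _ (Nat.lt_succ_self _)
  · by_cases hU : p ∈ pvUniv g
    · exact Prod.Lex.left _ _ (pv_filter_lt hU (by assumption))
    · rw [pv_children_nil hU]
      exact Prod.Lex.right' Nat.lt (le_of_eq (pv_filter_add_eq hU)) (by simp)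
  · exact Prod.Lex.right _ (Nat.lt_succ_self _)

def compute_ancestors_py (node : String) (subclass_of : List (String × List String))
    (trail : Option (List String)) : List String :=
  pvGoA subclass_of (PySem.Set.ofList (trail.getD [])) PySem.Set.empty
    (pvChildren subclass_of node)

-- ===== PORT B =====
-- Source B's while-loop over the explicit stack of child lists: state = (blocked set, found list);
-- empty top is popped; a blocked head is dropped; a new head is recorded and its children pushed
def pvRun (g : List (String × List String)) :
    List (List String) → PySem.Set String × List String → PySem.Set String × List String
  | [], st => st
  | [] :: stk, st => pvRun g stk st
  | (p :: ps) :: stk, (b, f) =>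
    if p ∈ b then pvRun g (ps :: stk) (b, f)
    else pvRun g ((PySem.Dict.mk g).getD p [] :: ps :: stk)
      (PySem.Set.add b p, f ++ [p])
termination_by stks st =>
  (((g.map Prod.fst).filter (fun x => decide (x ∉ st.1))).length,
    2 * stks.flatten.length + stks.length)
decreasing_by
  · apply Prod.Lex.right
    simp only [List.flatten_cons, List.nil_append, List.length_cons]
    exact Nat.add_lt_add_left (Nat.lt_succ_self _) _
  · apply Prod.Lex.right
    simp only [List.flatten_cons, List.length_cons, List.length_append, List.cons_append]
    omega
  · by_cases hU : p ∈ g.map Prod.fst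
    · exact Prod.Lex.left _ _ (pv_filter_lt hU (by assumption))
    · rw [pv_keys_nil hU]
      apply Prod.Lex.right' Nat.lt (le_of_eq (pv_filter_add_eq hU))
      simp only [List.flatten_cons, List.nil_append, List.length_cons, List.length_append,
        List.cons_append]
      exact (by omega :
        2 * (ps.length + stk.flatten.length) + (stk.length + 1 + 1)
          < 2 * (ps.length + stk.flatten.length + 1) + (stk.length + 1))

def compute_ancestors_py_alt (node : String) (subclass_of : List (String × List String))
    (trail : Option (List String)) : List String :=
  PySem.Set.ofList
    (pvRun subclass_of [(PySem.Dict.mk subclass_of).getD node []]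
      (PySem.Set.ofList (trail.getD []), [])).2

-- ===== PRECONDITION & SPEC =====
def Spec_compute_ancestors_py (node : String) (subclass_of : List (String × List String)) (trail : Option (List String)) (out : List String) : Prop := out = compute_ancestors_py_alt node subclass_of trail
instance (node : String) (subclass_of : List (String × List String)) (trail : Option (List String)) (out : List String) : Decidable (Spec_compute_ancestors_py node subclass_of trail out) := by unfold Spec_compute_ancestors_py; infer_instance

-- ===== CLAIM (what is proved, stated in full; the proofs are below) =====
def Claim_equal_compute_ancestors_py : Prop := ∀ (node : String) (subclass_of : List (String × List String)) (trail : Option (List String)), Dom_compute_ancestors_py node subclass_of trail → Spec_compute_ancestors_py node subclass_of trail (compute_ancestors_py node subclass_of trail)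

-- ===== LEMMAS AND PROOFS =====

-- proof-side reference: a FLAT worklist version of B's loop; pvRun is reduced to it and A
-- is proved equal to it by the lockstep invariant pv_main
def pvGoB (g : List (String × List String)) (t : PySem.Set String) :
    List String → PySem.Set String → PySem.Set String
  | [], acc => acc
  | p :: rest, acc =>
    if p ∈ t ∨ p ∈ acc then pvGoB g t rest acc
    else pvGoB g t (pvChildren g p ++ rest) (PySem.Set.add acc p)
termination_by ps acc => (((pvUniv g).filter (fun x => decide (x ∉ acc))).length, ps.length)
decreasing_by
  · exact Prod.Lex.right _ (Nat.lt_succ_self _)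
  · by_cases hU : p ∈ pvUniv g
    · exact Prod.Lex.left _ _ (pv_filter_lt hU (by tauto))
    · rw [pv_children_nil hU]
      exact Prod.Lex.right' Nat.lt (le_of_eq (pv_filter_add_eq hU)) (by simp)

lemma pv_update_add_right (a b : PySem.Set String) (x : String) :
    PySem.Set.update a (PySem.Set.add b x) = PySem.Set.add (PySem.Set.update a b) x := by
  by_cases hx : x ∈ b
  · rw [PySem.Set.add_of_mem hx,
      PySem.Set.add_of_mem ((PySem.Set.mem_update a b x).mpr (Or.inr hx))]
  · rw [PySem.Set.add_of_not_mem hx]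
    show (b ++ [x]).foldl PySem.Set.add a = _
    rw [List.foldl_append]
    rfl

lemma pv_update_update (a b : PySem.Set String) (l : List String) :
    PySem.Set.update a (PySem.Set.update b l) = PySem.Set.update (PySem.Set.update a b) l := by
  induction l generalizing b with
  | nil => rfl
  | cons x xs ih =>
    rw [PySem.Set.update_cons, PySem.Set.update_cons, ih, pv_update_add_right]

lemma pv_update_of_subset {a : PySem.Set String} {l : List String}
    (h : ∀ x ∈ l, x ∈ a) : PySem.Set.update a l = a := by
  induction l with
  | nil => rfl
  | cons x xs ih =>
    rw [PySem.Set.update_cons, PySem.Set.add_of_mem (h x (by simp))]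
    exact ih fun y hy => h y (by simp [hy])

-- appending the accumulated results in front of A's recursion commutes with the recursion
lemma pv_liftA (g : List (String × List String)) :
    ∀ (seen r : PySem.Set String) (ps : List String) (r₀ : PySem.Set String),
      PySem.Set.update r₀ (pvGoA g seen r ps) = pvGoA g seen (PySem.Set.update r₀ r) ps := by
  intro seen r ps
  induction seen, r, ps using pvGoA.induct g with
  | case1 seen r => intro r₀; simp only [pvGoA]
  | case2 seen r p rest h ih =>
    intro r₀
    simp only [pvGoA, if_pos h]
    exact ih r₀
  | case3 seen r p rest h ihInner ihRest =>
    intro r₀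
    simp only [pvGoA, if_neg h]
    rw [ihRest r₀, pv_update_update, pv_update_add_right]

-- B's flat loop processes a concatenated worklist in two stages
lemma pv_Bsplit (g : List (String × List String)) (t : PySem.Set String) :
    ∀ (ps : List String) (acc : PySem.Set String) (ys : List String),
      pvGoB g t (ps ++ ys) acc = pvGoB g t ys (pvGoB g t ps acc) := by
  intro ps acc
  induction ps, acc using pvGoB.induct g t with
  | case1 acc => intro ys; rw [List.nil_append]; simp only [pvGoB]
  | case2 p rest acc h ih =>
    intro ys
    rw [List.cons_append]
    simp only [pvGoB, if_pos h]
    exact ih ys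
  | case3 p rest acc h ih =>
    intro ys
    rw [List.cons_append]
    simp only [pvGoB, if_neg h]
    rw [← List.append_assoc]
    exact ih ys

-- the flat loop keeps its accumulator duplicate-free
lemma pv_Bnodup (g : List (String × List String)) (t : PySem.Set String) :
    ∀ (ps : List String) (acc : PySem.Set String), acc.Nodup → (pvGoB g t ps acc).Nodup := by
  intro ps acc
  induction ps, acc using pvGoB.induct g t with
  | case1 acc => intro h; simpa only [pvGoB] using h
  | case2 p rest acc h ih =>
    intro hn
    simp only [pvGoB, if_pos h]
    exact ih hn
  | case3 p rest acc h ih =>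
    intro hn
    simp only [pvGoB, if_neg h]
    exact ih (PySem.Set.nodup_add _ _ hn)

-- pvRun (B's stack machine) computes the flat worklist loop on the flattened stack
lemma pv_run_eq (g : List (String × List String)) (t : PySem.Set String) :
    ∀ (stks : List (List String)) (st : PySem.Set String × List String),
      (∀ x, x ∈ st.1 ↔ x ∈ t ∨ x ∈ st.2) →
      (pvRun g stks st).2 = pvGoB g t stks.flatten st.2 := by
  intro stks st
  induction stks, st using pvRun.induct g with
  | case1 st =>
    intro _
    simp only [pvRun, List.flatten_nil, pvGoB]
  | case2 stk st ih =>
    intro hinv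
    simp only [pvRun, List.flatten_cons, List.nil_append]
    exact ih hinv
  | case3 p ps stk b f h ih =>
    intro hinv
    simp only [pvRun, if_pos h, List.flatten_cons]
    have hguard : p ∈ t ∨ p ∈ f := (hinv p).mp h
    rw [show ((p :: ps) ++ stk.flatten : List String) = p :: (ps ++ stk.flatten) by rfl]
    rw [show pvGoB g t (p :: (ps ++ stk.flatten)) f = pvGoB g t (ps ++ stk.flatten) f by
      simp only [pvGoB, if_pos hguard]]
    exact ih hinv
  | case4 p ps stk b f h ih =>
    intro hinv
    have hpf : p ∉ f := fun hf => h ((hinv p).mpr (Or.inr hf))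
    have hpt : p ∉ t := fun ht => h ((hinv p).mpr (Or.inl ht))
    simp only [pvRun, if_neg h, List.flatten_cons]
    rw [show ((p :: ps) ++ stk.flatten : List String) = p :: (ps ++ stk.flatten) by rfl]
    rw [show pvGoB g t (p :: (ps ++ stk.flatten)) f
        = pvGoB g t (pvChildren g p ++ (ps ++ stk.flatten)) (PySem.Set.add f p) by
      simp only [pvGoB, if_neg (by tauto : ¬(p ∈ t ∨ p ∈ f))]]
    rw [PySem.Set.add_of_not_mem hpf]
    have hinv' : ∀ x, x ∈ PySem.Set.add b p ↔ x ∈ t ∨ x ∈ f ++ [p] := by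
      intro x
      rw [PySem.Set.mem_add, List.mem_append]
      constructor
      · rintro (hx | rfl)
        · rcases (hinv x).mp hx with ht | hf
          · exact Or.inl ht
          · exact Or.inr (Or.inl hf)
        · exact Or.inr (Or.inr (by simp))
      · rintro (ht | hf | hx)
        · exact Or.inl ((hinv x).mpr (Or.inl ht))
        · exact Or.inl ((hinv x).mpr (Or.inr hf))
        · simp at hx; exact Or.inr hx
    have := ih hinv'
    simp only [List.flatten_cons] at this
    rw [this]
    rfl

-- re-exploring a region all of whose members are already collected (and whose non-open members
-- are fully expanded) yields nothing new
lemma pv_closedA (g : List (String × List String)) (t acc : List String) :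
    ∀ (seen r : PySem.Set String) (ps : List String), ∀ P : List String,
      (∀ x, x ∈ seen ↔ x ∈ t ∨ x ∈ P) →
      (∀ x ∈ P, x ∈ acc) →
      (∀ x ∈ acc, x ∈ P ∨ (∀ c ∈ pvChildren g x, c ∈ t ∨ c ∈ acc)) →
      (∀ p ∈ ps, p ∈ t ∨ p ∈ acc) →
      (∀ x ∈ r, x ∈ acc) →
      ∀ x ∈ pvGoA g seen r ps, x ∈ acc := by
  intro seen r ps
  induction seen, r, ps using pvGoA.induct g with
  | case1 seen r =>
    intro P hseen hP hinv hps hr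
    simpa only [pvGoA] using hr
  | case2 seen r p rest h ih =>
    intro P hseen hP hinv hps hr
    simp only [pvGoA, if_pos h]
    exact ih P hseen hP hinv (fun q hq => hps q (by simp [hq])) hr
  | case3 seen r p rest h ihInner ihRest =>
    intro P hseen hP hinv hps hr
    simp only [pvGoA, if_neg h]
    have hpt : p ∉ t := fun ht => h ((hseen p).mpr (Or.inl ht))
    have hpacc : p ∈ acc := by
      rcases hps p (by simp) with ht | ha
      · exact absurd ht hpt
      · exact ha
    have hpnotP : p ∉ P := fun hPp => h ((hseen p).mpr (Or.inr hPp))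
    have hclosed : ∀ c ∈ pvChildren g p, c ∈ t ∨ c ∈ acc := by
      rcases hinv p hpacc with hPp | hc
      · exact absurd hPp hpnotP
      · exact hc
    have hS : ∀ x ∈ pvGoA g (PySem.Set.add seen p) PySem.Set.empty (pvChildren g p), x ∈ acc := by
      apply ihInner (P ++ [p])
      · intro x
        rw [PySem.Set.mem_add]
        constructor
        · rintro (hx | rfl)
          · rcases (hseen x).mp hx with ht | hPx
            · exact Or.inl ht
            · exact Or.inr (by simp [hPx])
          · exact Or.inr (by simp)
        · rintro (ht | hx)
          · exact Or.inl ((hseen x).mpr (Or.inl ht))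
          · rcases List.mem_append.mp hx with hPx | hx
            · exact Or.inl ((hseen x).mpr (Or.inr hPx))
            · simp at hx; subst hx; exact Or.inr rfl
      · intro x hx
        rcases List.mem_append.mp hx with hPx | hx
        · exact hP x hPx
        · simp at hx; subst hx; exact hpacc
      · intro x hx
        rcases hinv x hx with hPx | hc
        · exact Or.inl (by simp [hPx])
        · exact Or.inr hc
      · exact hclosed
      · intro x hx; simp [PySem.Set.empty] at hx
    apply ihRest P hseen hP hinv (fun q hq => hps q (by simp [hq]))
    intro x hx
    rcases (PySem.Set.mem_update _ _ x).mp hx with hx | hx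
    · rcases (PySem.Set.mem_add _ _ _).mp hx with hx | rfl
      · exact hr x hx
      · exact hpacc
    · exact hS x hx

-- the main lockstep invariant: A's trail recursion and the flat visited-set loop build the SAME list
lemma pv_main (g : List (String × List String)) (t : List String) :
    ∀ (seen r : PySem.Set String) (ps : List String),
      ∀ (acc : PySem.Set String) (P : List String),
      (∀ x, x ∈ seen ↔ x ∈ t ∨ x ∈ P) →
      (∀ x ∈ acc, x ∈ P ∨ (∀ c ∈ pvChildren g x, c ∈ t ∨ c ∈ acc)) →
      (∀ x ∈ P, x ∈ acc) →
      (∀ x ∈ acc, x ∉ t) →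
      pvGoA g seen acc ps = pvGoB g t ps acc ∧
      (∀ x ∈ acc, x ∈ pvGoB g t ps acc) ∧
      (∀ p ∈ ps, p ∈ t ∨ p ∈ pvGoB g t ps acc) ∧
      (∀ x ∈ pvGoB g t ps acc,
        x ∈ P ∨ (∀ c ∈ pvChildren g x, c ∈ t ∨ c ∈ pvGoB g t ps acc)) ∧
      (∀ x ∈ pvGoB g t ps acc, x ∉ t) := by
  intro seen r ps
  induction seen, r, ps using pvGoA.induct g with
  | case1 seen r =>
    intro acc P hseen hinv hP hacct
    have eA : pvGoA g seen acc [] = acc := by simp only [pvGoA]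
    have eB : pvGoB g t [] acc = acc := by simp only [pvGoB]
    rw [eA, eB]
    exact ⟨rfl, fun _ hx => hx, fun q hq => by simp at hq, hinv, hacct⟩
  | case2 seen r p rest h ih =>
    intro acc P hseen hinv hP hacct
    have hguard : p ∈ t ∨ p ∈ acc := by
      rcases (hseen p).mp h with ht | hPp
      · exact Or.inl ht
      · exact Or.inr (hP p hPp)
    have hB : pvGoB g t (p :: rest) acc = pvGoB g t rest acc := by
      simp only [pvGoB, if_pos hguard]
    have hA : pvGoA g seen acc (p :: rest) = pvGoA g seen acc rest := by
      simp only [pvGoA, if_pos h]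
    rw [hA, hB]
    obtain ⟨heq, hsub, hps, hinv', hint'⟩ := ih acc P hseen hinv hP hacct
    refine ⟨heq, hsub, ?_, hinv', hint'⟩
    intro q hq
    rcases List.mem_cons.mp hq with rfl | hq
    · rcases hguard with ht | ha
      · exact Or.inl ht
      · exact Or.inr (hsub q ha)
    · exact hps q hq
  | case3 seen r p rest h ihInner ihRest =>
    intro acc P hseen hinv hP hacct
    have hpt : p ∉ t := fun ht => h ((hseen p).mpr (Or.inl ht))
    have hpnotP : p ∉ P := fun hPp => h ((hseen p).mpr (Or.inr hPp))
    by_cases hpacc : p ∈ acc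
    · -- already collected: A re-explores and finds nothing new, B skips
      have hclosed : ∀ c ∈ pvChildren g p, c ∈ t ∨ c ∈ acc := by
        rcases hinv p hpacc with hPp | hc
        · exact absurd hPp hpnotP
        · exact hc
      have hS : ∀ x ∈ pvGoA g (PySem.Set.add seen p) PySem.Set.empty (pvChildren g p),
          x ∈ acc := by
        apply pv_closedA g t acc (PySem.Set.add seen p) PySem.Set.empty (pvChildren g p)
          (P ++ [p])
        · intro x
          rw [PySem.Set.mem_add]
          constructor
          · rintro (hx | rfl)
            · rcases (hseen x).mp hx with ht | hPx
              · exact Or.inl ht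
              · exact Or.inr (by simp [hPx])
            · exact Or.inr (by simp)
          · rintro (ht | hx)
            · exact Or.inl ((hseen x).mpr (Or.inl ht))
            · rcases List.mem_append.mp hx with hPx | hx
              · exact Or.inl ((hseen x).mpr (Or.inr hPx))
              · simp at hx; subst hx; exact Or.inr rfl
        · intro x hx
          rcases List.mem_append.mp hx with hPx | hx
          · exact hP x hPx
          · simp at hx; subst hx; exact hpacc
        · intro x hx
          rcases hinv x hx with hPx | hc
          · exact Or.inl (by simp [hPx])
          · exact Or.inr hc
        · exact hclosed
        · intro x hx; simp [PySem.Set.empty] at hx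
      have hA : pvGoA g seen acc (p :: rest) = pvGoA g seen acc rest := by
        simp only [pvGoA, if_neg h]
        rw [PySem.Set.add_of_mem hpacc, pv_update_of_subset hS]
      have hB : pvGoB g t (p :: rest) acc = pvGoB g t rest acc := by
        simp only [pvGoB, if_pos (Or.inr hpacc)]
      rw [hA, hB]
      obtain ⟨heq, hsub, hps, hinv', hint'⟩ := ihRest acc P hseen hinv hP hacct
      refine ⟨heq, hsub, ?_, hinv', hint'⟩
      intro q hq
      rcases List.mem_cons.mp hq with rfl | hq
      · exact Or.inr (hsub q hpacc)
      · exact hps q hq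
    · -- new node: both sides expand p
      have hseen' : ∀ x, x ∈ PySem.Set.add seen p ↔ x ∈ t ∨ x ∈ P ++ [p] := by
        intro x
        rw [PySem.Set.mem_add]
        constructor
        · rintro (hx | rfl)
          · rcases (hseen x).mp hx with ht | hPx
            · exact Or.inl ht
            · exact Or.inr (by simp [hPx])
          · exact Or.inr (by simp)
        · rintro (ht | hx)
          · exact Or.inl ((hseen x).mpr (Or.inl ht))
          · rcases List.mem_append.mp hx with hPx | hx
            · exact Or.inl ((hseen x).mpr (Or.inr hPx))
            · simp at hx; subst hx; exact Or.inr rfl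
      have hmemaddp : p ∈ PySem.Set.add acc p := (PySem.Set.mem_add acc p p).mpr (Or.inr rfl)
      obtain ⟨heqI, hsubI, hpsI, hinvI, hintI⟩ :=
        ihInner (PySem.Set.add acc p) (P ++ [p]) hseen'
          (by
            intro x hx
            rcases (PySem.Set.mem_add acc p x).mp hx with hx | rfl
            · rcases hinv x hx with hPx | hc
              · exact Or.inl (by simp [hPx])
              · exact Or.inr fun c hc' => by
                  rcases hc c hc' with ht | ha
                  · exact Or.inl ht
                  · exact Or.inr ((PySem.Set.mem_add acc p c).mpr (Or.inl ha))
            · exact Or.inl (by simp))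
          (by
            intro x hx
            rcases List.mem_append.mp hx with hPx | hx
            · exact (PySem.Set.mem_add acc p x).mpr (Or.inl (hP x hPx))
            · simp at hx; subst hx; exact hmemaddp)
          (by
            intro x hx
            rcases (PySem.Set.mem_add acc p x).mp hx with hx | rfl
            · exact hacct x hx
            · exact hpt)
      have hA : pvGoA g seen acc (p :: rest) =
          pvGoA g seen (pvGoB g t (pvChildren g p) (PySem.Set.add acc p)) rest := by
        simp only [pvGoA, if_neg h]
        congr 1
        have h1 : PySem.Set.update (PySem.Set.add acc p)
            (pvGoA g (PySem.Set.add seen p) PySem.Set.empty (pvChildren g p))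
            = pvGoA g (PySem.Set.add seen p) (PySem.Set.add acc p) (pvChildren g p) := by
          rw [pv_liftA]
          rfl
        rw [h1, heqI]
      have hB : pvGoB g t (p :: rest) acc =
          pvGoB g t rest (pvGoB g t (pvChildren g p) (PySem.Set.add acc p)) := by
        simp only [pvGoB, if_neg (by tauto : ¬(p ∈ t ∨ p ∈ acc))]
        exact pv_Bsplit g t (pvChildren g p) (PySem.Set.add acc p) rest
      set acc₂ := pvGoB g t (pvChildren g p) (PySem.Set.add acc p) with hacc₂
      obtain ⟨heqR, hsubR, hpsR, hinvR, hintR⟩ :=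
        ihRest acc₂ P hseen
          (by
            intro x hx
            rcases hinvI x hx with hPx | hc
            · rcases List.mem_append.mp hPx with hPx | hxp
              · exact Or.inl hPx
              · simp at hxp; subst hxp
                exact Or.inr fun c hc' => hpsI c hc'
            · exact Or.inr hc)
          (fun x hx => hsubI x ((PySem.Set.mem_add acc p x).mpr (Or.inl (hP x hx))))
          hintI
      rw [hA, hB]
      refine ⟨heqR, ?_, ?_, hinvR, hintR⟩
      · intro x hx
        exact hsubR x (hsubI x ((PySem.Set.mem_add acc p x).mpr (Or.inl hx)))
      · intro q hq
        rcases List.mem_cons.mp hq with rfl | hq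
        · exact Or.inr (hsubR q (hsubI q hmemaddp))
        · exact hpsR q hq

-- ===== VERDICT (by name: the statement is the Claim_ definition above) =====
theorem compute_ancestors_py_spec : Claim_equal_compute_ancestors_py := by
  intro node g trail _
  unfold Spec_compute_ancestors_py compute_ancestors_py compute_ancestors_py_alt
  have hA := (pv_main g (PySem.Set.ofList (trail.getD [])) (PySem.Set.ofList (trail.getD []))
    PySem.Set.empty (pvChildren g node) PySem.Set.empty []
    (by simp) (by simp [PySem.Set.empty]) (by simp) (by simp [PySem.Set.empty])).1
  have hR := pv_run_eq g (PySem.Set.ofList (trail.getD []))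
    [(PySem.Dict.mk g).getD node []] (PySem.Set.ofList (trail.getD []), [])
    (by intro x; simp)
  simp only [List.flatten_cons, List.flatten_nil, List.append_nil] at hR
  rw [hA, hR]
  rw [PySem.Set.ofList_eq_self_of_nodup _
    (pv_Bnodup g (PySem.Set.ofList (trail.getD [])) ((PySem.Dict.mk g).getD node []) [] (by simp))]
  rfl
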